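-- pv_equiv track=rewrite | github.com/yupitsleen/Practice-Problems | python-homeworks/hw4/hw4.py | exclamation
-- ===== SOURCE A (Python) =====
-- def exclamation(someStr):
--     newLst=""
--
--     for vowel in someStr:
--         if vowel in "aeiouAEIOU":
--             for i in range(4):
--                 newLst+=vowel
--         else:
--             newLst+=vowel
--     return newLst+'!'
-- ===== SOURCE B (Python) =====
-- def exclamation(someStr):
--     s = someStr
--     for v in "aeiouAEIOU":
--         s = s.replace(v, v * 4)
--     return s + '!'
-- ===== Notes on version B (the rewrite author's own statement) =====
-- stated objective: idiomatic
-- what changed: Replaces A's character-by-character scan with an inner repeat-4 loop by ten whole-string str.replace passes, one per vowel, then appends the exclamation mark; correct because the ten vowels are distinct single characters so replacements never interact.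
import Mathlib
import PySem

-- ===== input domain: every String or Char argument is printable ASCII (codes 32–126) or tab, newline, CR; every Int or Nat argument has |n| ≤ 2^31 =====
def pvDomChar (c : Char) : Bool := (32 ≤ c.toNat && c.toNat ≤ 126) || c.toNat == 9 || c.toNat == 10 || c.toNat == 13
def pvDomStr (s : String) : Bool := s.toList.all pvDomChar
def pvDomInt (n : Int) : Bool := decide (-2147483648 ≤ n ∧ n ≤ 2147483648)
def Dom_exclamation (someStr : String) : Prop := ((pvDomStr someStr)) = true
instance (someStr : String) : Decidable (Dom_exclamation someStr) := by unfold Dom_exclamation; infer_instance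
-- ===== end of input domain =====

-- B quadruples vowels by ten whole-string replace passes (one per vowel) instead of A's
-- single char-by-char scan with an inner repeat-4 loop; objective: idiomatic.

-- ===== PORT A =====
def exclamation (someStr : String) : String :=
  -- newLst accumulated char by char; the inner `for i in range(4)` is the foldl over pyRange 0 4 1
  let newLst : List Char :=
    someStr.toList.foldl (fun acc vowel =>
      if PySem.Chars.isIn [vowel] "aeiouAEIOU".toList then
        (PySem.List.pyRange 0 4 1).foldl (fun a _ => a ++ [vowel]) acc
      else acc ++ [vowel]) []
  String.ofList newLst ++ "!"

-- ===== PORT B =====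
def exclamation_alt (someStr : String) : String :=
  (("aeiouAEIOU".toList).foldl
    (fun s v => PySem.Str.replace s (String.ofList [v]) (String.ofList [v, v, v, v])) someStr) ++ "!"

-- ===== PRECONDITION & SPEC =====
def Spec_exclamation (someStr : String) (out : String) : Prop := out = exclamation_alt someStr
instance (someStr : String) (out : String) : Decidable (Spec_exclamation someStr out) := by unfold Spec_exclamation; infer_instance

-- ===== CLAIM (what is proved, stated in full; the proofs are below) =====
def Claim_equal_exclamation : Prop := ∀ (someStr : String), Dom_exclamation someStr → Spec_exclamation someStr (exclamation someStr)

-- ===== LEMMAS AND PROOFS =====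

-- expansion both programs compute, char by char
def pvExpand (vs : List Char) (c : Char) : List Char :=
  if c ∈ vs then [c, c, c, c] else [c]

theorem pv_isIn_singleton (c : Char) (l : List Char) :
    PySem.Chars.isIn [c] l = decide (c ∈ l) := by
  by_cases h : c ∈ l
  · simp only [h, decide_true]
    rw [PySem.Chars.isIn_iff_infix]
    obtain ⟨s, t, rfl⟩ := List.append_of_mem h
    exact ⟨s, t, by simp⟩
  · simp only [h, decide_false]
    rw [PySem.Chars.isIn_eq_false_iff]
    intro hinf
    exact h (hinf.sublist.subset (by simp))

theorem pv_range4 : PySem.List.pyRange 0 4 1 = [0, 1, 2, 3] := by decide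

theorem pv_foldl_append {α : Type} (g : α → List Char) :
    ∀ (l : List α) (acc : List Char),
      l.foldl (fun a c => a ++ g c) acc = acc ++ l.flatMap g := by
  intro l
  induction l with
  | nil => simp
  | cons c t ih => intro acc; simp [ih]

theorem pvA_fold (l : List Char) (acc : List Char) :
    l.foldl (fun acc vowel =>
      if PySem.Chars.isIn [vowel] "aeiouAEIOU".toList then
        (PySem.List.pyRange 0 4 1).foldl (fun a _ => a ++ [vowel]) acc
      else acc ++ [vowel]) acc
    = acc ++ l.flatMap (pvExpand "aeiouAEIOU".toList) := by
  have hstep : (fun (acc : List Char) (vowel : Char) =>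
      if PySem.Chars.isIn [vowel] "aeiouAEIOU".toList then
        (PySem.List.pyRange 0 4 1).foldl (fun a _ => a ++ [vowel]) acc
      else acc ++ [vowel])
      = fun acc c => acc ++ pvExpand "aeiouAEIOU".toList c := by
    funext acc c
    rw [pv_isIn_singleton, pv_range4]
    simp only [List.foldl_cons, List.foldl_nil, decide_eq_true_eq, pvExpand]
    split_ifs <;> simp
  rw [hstep, pv_foldl_append]

theorem pv_replace_go_singleton (v : Char) (new : List Char) :
    ∀ (fuel : Nat) (l acc : List Char), l.length ≤ fuel →
      PySem.Chars.replace.go [v] new fuel l acc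
        = acc.reverse ++ l.flatMap (fun c => if c = v then new else [c]) := by
  intro fuel
  induction fuel with
  | zero =>
    intro l acc h
    have : l = [] := List.eq_nil_of_length_eq_zero (Nat.le_zero.mp h)
    subst this
    simp [PySem.Chars.replace.go]
  | succ n ih =>
    intro l acc h
    cases l with
    | nil => simp [PySem.Chars.replace.go]
    | cons c t =>
      simp only [List.length_cons] at h
      by_cases hc : c = v
      · subst hc
        have hp : List.isPrefixOf [c] (c :: t) = true := by simp [List.isPrefixOf]
        have hd : List.drop [c].length (c :: t) = t := rfl
        rw [PySem.Chars.replace.go, if_pos hp, hd, ih _ _ (by omega)]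
        simp
      · have hp : List.isPrefixOf [v] (c :: t) = false := by
          simp only [List.isPrefixOf, Bool.and_true, beq_eq_false_iff_ne,
            ne_eq]
          exact fun h' => hc h'.symm
        rw [PySem.Chars.replace.go, if_neg (by simp [hp])]
        rw [ih _ _ (by omega)]
        simp [hc]

theorem pv_replace_singleton (l : List Char) (v : Char) (new : List Char) :
    PySem.Chars.replace l [v] new
      = l.flatMap (fun c => if c = v then new else [c]) := by
  rw [PySem.Chars.replace]
  simp only [List.isEmpty_cons, if_false, Bool.false_eq_true]
  exact (by simpa using pv_replace_go_singleton v new l.length l [] le_rfl)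

theorem pv_flatMap_flatMap {α β γ : Type} (l : List α) (f : α → List β) (g : β → List γ) :
    (l.flatMap f).flatMap g = l.flatMap (fun x => (f x).flatMap g) := by
  induction l with
  | nil => rfl
  | cons a t ih => simp [ih]

theorem pv_flatMap_congr {α β : Type} (l : List α) (f g : α → List β)
    (h : ∀ x ∈ l, f x = g x) : l.flatMap f = l.flatMap g := by
  induction l with
  | nil => rfl
  | cons a t ih =>
    simp only [List.flatMap_cons]
    rw [h a (by simp), ih (fun x hx => h x (by simp [hx]))]

theorem pvB_fold (vs : List Char) (hnd : vs.Nodup) (l : List Char) :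
    vs.foldl (fun s v => PySem.Chars.replace s [v] [v, v, v, v]) l
      = l.flatMap (pvExpand vs) := by
  induction vs generalizing l with
  | nil =>
    rw [show pvExpand ([] : List Char) = fun c => [c] by funext c; simp [pvExpand]]
    simp
  | cons v t ih =>
    have hnd' : t.Nodup := hnd.of_cons
    have hv : v ∉ t := (List.nodup_cons.mp hnd).1
    simp only [List.foldl_cons]
    rw [pv_replace_singleton, ih hnd', pv_flatMap_flatMap]
    apply pv_flatMap_congr
    intro c _
    by_cases hc : c = v
    · subst hc
      simp [pvExpand, hv]
    · simp [pvExpand, hc, List.mem_cons]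

theorem pvB_fold_str (vs : List Char) (s : String) :
    (vs.foldl (fun s v => PySem.Str.replace s (String.ofList [v]) (String.ofList [v, v, v, v])) s).toList
      = vs.foldl (fun l v => PySem.Chars.replace l [v] [v, v, v, v]) s.toList := by
  induction vs generalizing s with
  | nil => rfl
  | cons v t ih =>
    simp only [List.foldl_cons]
    rw [ih, PySem.Str.toList_replace]
    simp

-- ===== VERDICT (by name: the statement is the Claim_ definition above) =====
theorem exclamation_spec : Claim_equal_exclamation := by
  intro s _
  unfold Spec_exclamation exclamation exclamation_alt
  apply String.ext
  rw [String.toList_append, String.toList_append, pvB_fold_str,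
      pvB_fold _ (by decide), pvA_fold]
  simp
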